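-- pv_equiv track=rewrite | github.com/2vinaa/School | School/Prog/Linked List/multidimensional_array.py | find_position_in_memory
-- ===== SOURCE A (Python) =====
-- def find_position_in_memory(indexes, dimension):
--     # Ensure the number of indexes matches the number of dimensions
--     assert len(indexes) == len(dimension)
--
--     dim = len(dimension)  # Number of dimensions
--     index = 0             # Final computed memory position
--
--     # Loop over each dimension
--     for i in range(dim):
--         partial_result = indexes[i]  # Start with the current index value
--
--         # Multiply by the size of all dimensions after i
--         for k in range(i + 1, dim):
--             partial_result *= dimension[k]
--
--         # Add the partial result to the total index
--         index += partial_result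
--
--     return index  # Return the computed linear memory position
-- ===== SOURCE B (Python) =====
-- def find_position_in_memory(indexes, dimension):
--     assert len(indexes) == len(dimension)
--     index = 0
--     for idx, d in zip(indexes, dimension):
--         index = index * d + idx
--     return index
-- ===== Notes on version B (the rewrite author's own statement) =====
-- stated objective: faster
-- what changed: Replaced the nested loops (for each dimension, re-multiply all later dimensions) by a single Horner-style pass accumulating index = index*dim[i] + indexes[i] over zip(indexes, dimension).
import Mathlib
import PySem

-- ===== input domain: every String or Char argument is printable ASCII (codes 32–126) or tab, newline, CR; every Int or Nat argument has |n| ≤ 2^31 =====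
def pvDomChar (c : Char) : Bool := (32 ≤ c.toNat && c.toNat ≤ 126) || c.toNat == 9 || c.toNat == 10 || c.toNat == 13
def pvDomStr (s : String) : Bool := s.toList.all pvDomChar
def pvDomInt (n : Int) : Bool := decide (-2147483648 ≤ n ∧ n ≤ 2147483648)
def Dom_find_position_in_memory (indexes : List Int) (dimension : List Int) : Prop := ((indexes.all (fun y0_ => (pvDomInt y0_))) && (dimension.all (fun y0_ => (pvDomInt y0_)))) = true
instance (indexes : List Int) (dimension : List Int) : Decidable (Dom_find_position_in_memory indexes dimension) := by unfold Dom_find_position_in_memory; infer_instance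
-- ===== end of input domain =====

-- B replaces A's O(d^2) nested loops by a single Horner-style pass over zip(indexes, dimension).


-- ===== PORT A =====
-- literal port of A: outer loop over i in range(dim); inner loop multiplies by dimension[k]
def find_position_in_memory (indexes : List Int) (dimension : List Int) : Int :=
  let dim : Int := dimension.length
  (PySem.List.pyRange 0 dim 1).foldl
    (fun index i =>
      index + (PySem.List.pyRange (i + 1) dim 1).foldl
        (fun partial_result k => partial_result * PySem.List.pyGetD dimension k 0)
        (PySem.List.pyGetD indexes i 0))
    0

-- ===== PORT B =====
-- literal port of B: one Horner pass over zip(indexes, dimension)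
def find_position_in_memory_alt (indexes : List Int) (dimension : List Int) : Int :=
  (indexes.zip dimension).foldl (fun index p => index * p.2 + p.1) 0

-- ===== PRECONDITION & SPEC =====
-- A asserts len(indexes) == len(dimension); Pre_ excludes exactly the inputs where that assert raises.
def Pre_find_position_in_memory (indexes : List Int) (dimension : List Int) : Prop :=
  indexes.length = dimension.length
instance (indexes : List Int) (dimension : List Int) : Decidable (Pre_find_position_in_memory indexes dimension) := by unfold Pre_find_position_in_memory; infer_instance
def pvWitness_find_position_in_memory : List Int × List Int := ([1, 2, 0], [4, 5, 6])

def Spec_find_position_in_memory (indexes : List Int) (dimension : List Int) (out : Int) : Prop := out = find_position_in_memory_alt indexes dimension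
instance (indexes : List Int) (dimension : List Int) (out : Int) : Decidable (Spec_find_position_in_memory indexes dimension out) := by unfold Spec_find_position_in_memory; infer_instance

-- ===== CLAIM (what is proved, stated in full; the proofs are below) =====
def Claim_equal_find_position_in_memory : Prop := ∀ (indexes : List Int) (dimension : List Int), Dom_find_position_in_memory indexes dimension → Pre_find_position_in_memory indexes dimension → Spec_find_position_in_memory indexes dimension (find_position_in_memory indexes dimension)

-- ===== LEMMAS AND PROOFS =====

-- folding multiplication = multiplying by the product
theorem pvFoldlMul (l : List Int) (v : Int) :
    l.foldl (fun a b => a * b) v = v * l.prod := by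
  induction l generalizing v with
  | nil => simp
  | cons d l ih => simp [ih, mul_assoc]

-- A's inner loop: partial_result = indexes[i] * prod(dimension[i+1:])
theorem pvInner (dimension : List Int) (a v : Int) (ha : 0 ≤ a) :
    (PySem.List.pyRange a (dimension.length : Int) 1).foldl
        (fun partial_result k => partial_result * PySem.List.pyGetD dimension k 0) v
      = v * (dimension.drop a.toNat).prod := by
  rw [PySem.List.foldl_pyRange_pyGetD' dimension 0 (fun a b => a * b) v ha, pvFoldlMul]

-- Horner fold is affine in its accumulator
theorem pvHornerLin (zs : List (Int × Int)) (r : Int) :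
    zs.foldl (fun index p => index * p.2 + p.1) r
      = r * (zs.map Prod.snd).prod + zs.foldl (fun index p => index * p.2 + p.1) 0 := by
  induction zs generalizing r with
  | nil => simp
  | cons p zs ih =>
    simp only [List.foldl_cons, List.map_cons, List.prod_cons]
    rw [ih (r * p.2 + p.1), ih (0 * p.2 + p.1)]
    ring

-- A's outer fold over range(m), with the inner bound fixed at len(dimension)
theorem pvAFold (indexes dimension : List Int) : ∀ m : Nat,
    (List.range m).foldl
        (fun (index : Int) (i : Nat) => index
          + (PySem.List.pyRange ((i : Int) + 1) ((dimension.length : Int)) 1).foldl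
              (fun partial_result k => partial_result * PySem.List.pyGetD dimension k 0)
              (PySem.List.pyGetD indexes ((i : Int)) 0))
        0
      = ((List.range m).map
          (fun k : Nat => PySem.List.pyGetD indexes ((k : Int)) 0 * (dimension.drop (k + 1)).prod)).sum := by
  intro m
  induction m with
  | zero => simp
  | succ n ih =>
    rw [List.range_succ, List.foldl_append, List.map_append, List.sum_append, ih]
    have h : ((n : Int) + 1).toNat = n + 1 := by omega
    simp only [List.foldl_cons, List.foldl_nil, List.map_cons, List.map_nil, List.sum_cons,
      List.sum_nil]
    rw [pvInner dimension ((n : Int) + 1) _ (by omega), h]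
    ring

-- A as a sum over List.range
theorem pvASum (indexes dimension : List Int) :
    find_position_in_memory indexes dimension
      = ((List.range dimension.length).map
          (fun k : Nat => PySem.List.pyGetD indexes ((k : Int)) 0 * (dimension.drop (k + 1)).prod)).sum := by
  simp only [find_position_in_memory]
  rw [PySem.List.pyRange_zero_nat, List.foldl_map]
  exact pvAFold indexes dimension dimension.length

-- B's cons recurrence, from the affine lemma
theorem pvAltCons (x d : Int) (xs ds : List Int) (hlen : xs.length = ds.length) :
    find_position_in_memory_alt (x :: xs) (d :: ds)
      = x * ds.prod + find_position_in_memory_alt xs ds := by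
  unfold find_position_in_memory_alt
  simp only [List.zip_cons_cons, List.foldl_cons]
  rw [pvHornerLin (xs.zip ds) (0 * d + x)]
  have hsnd : ((xs.zip ds).map Prod.snd) = ds := by
    rw [List.map_snd_zip]; omega
  rw [hsnd]; ring

-- main equivalence, by induction on the two equal-length lists
theorem pvMain (indexes dimension : List Int)
    (h : indexes.length = dimension.length) :
    find_position_in_memory indexes dimension = find_position_in_memory_alt indexes dimension := by
  rw [pvASum]
  induction indexes generalizing dimension with
  | nil =>
    cases dimension with
    | nil => simp [find_position_in_memory_alt]
    | cons d ds => simp at h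
  | cons x xs ih =>
    cases dimension with
    | nil => simp at h
    | cons d ds =>
      have hlen : xs.length = ds.length := by simpa using h
      simp only [List.length_cons, List.range_succ_eq_map, List.map_cons, List.map_map,
        List.sum_cons]
      have hmap : ((List.range ds.length).map
            ((fun k : Nat => PySem.List.pyGetD (x :: xs) ((k : Int)) 0
                * ((d :: ds).drop (k + 1)).prod) ∘ Nat.succ))
          = (List.range ds.length).map
            (fun k : Nat => PySem.List.pyGetD xs ((k : Int)) 0 * (ds.drop (k + 1)).prod) := by
        refine List.map_congr_left (fun k _ => ?_)
        show PySem.List.pyGetD (x :: xs) (((k + 1 : Nat) : Int)) 0 * ((d :: ds).drop (k + 1 + 1)).prod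
            = PySem.List.pyGetD xs ((k : Int)) 0 * (ds.drop (k + 1)).prod
        rw [PySem.List.pyGetD_natCast, PySem.List.pyGetD_natCast, List.getD_cons_succ]
        rfl
      rw [hmap, ih ds hlen, pvAltCons x d xs ds hlen]
      congr 1
      simp

-- ===== VERDICT (by name: the statement is the Claim_ definition above) =====
theorem find_position_in_memory_spec : Claim_equal_find_position_in_memory := by
  intro indexes dimension _ hpre
  exact pvMain indexes dimension hpre
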